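-- pv_equiv track=rewrite | github.com/tocchan/aoc-cs | 2020/day13.py | GetCyclesNeeded
-- ===== SOURCE A (Python) =====
-- def GetCyclesNeeded(val, group, inGroup):
--     # be sure to be in the cycle
--     while inGroup < 0:
--         inGroup += group
--     inGroup = inGroup % group
--
--     c = 0
--     m = 0
--     while m != inGroup:
--         m = (m + val) % group
--         c += 1
--
--     return c
-- ===== SOURCE B (Python) =====
-- def _egcd(a, b):
--     # iterative extended Euclid: returns (g, x) with g = gcd(a, b) and x*a == g (mod b)
--     old_r, r = a, b
--     old_s, s = 1, 0
--     while r != 0: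
--         q = old_r // r
--         old_r, r = r, old_r - q * r
--         old_s, s = s, old_s - q * s
--     return old_r, old_s
--
-- def GetCyclesNeeded(val, group, inGroup):
--     # solve c*val == inGroup (mod group) by modular inverse; smallest c >= 0
--     target = inGroup % group
--     g, x = _egcd(val % group, group)
--     if target % g != 0:
--         raise ValueError("no solution")
--     n = group // g
--     return (target // g) * x % n
-- ===== Notes on version B (the rewrite author's own statement) =====
-- stated objective: faster
-- what changed: A finds the cycle count by stepping m += val (mod group) one step at a time until it hits the target (O(group) iterations); B solves the linear congruence c*val == inGroup (mod group) directly with an iterative extended Euclid / modular inverse and takes the smallest nonnegative solution (O(log group)).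
import Mathlib
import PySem

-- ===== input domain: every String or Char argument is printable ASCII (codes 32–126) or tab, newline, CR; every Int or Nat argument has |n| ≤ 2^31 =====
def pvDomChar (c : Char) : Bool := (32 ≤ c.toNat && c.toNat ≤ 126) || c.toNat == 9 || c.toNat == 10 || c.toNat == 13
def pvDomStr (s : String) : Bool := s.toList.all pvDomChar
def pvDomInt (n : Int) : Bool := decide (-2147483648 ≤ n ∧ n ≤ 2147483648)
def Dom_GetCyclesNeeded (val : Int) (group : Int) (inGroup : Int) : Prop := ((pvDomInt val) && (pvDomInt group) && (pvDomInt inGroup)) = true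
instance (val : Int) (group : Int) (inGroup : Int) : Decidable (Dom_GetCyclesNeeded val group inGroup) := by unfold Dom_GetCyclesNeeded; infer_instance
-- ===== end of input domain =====

-- B replaces A's step-by-step cycle search (O(group) loop) by extended Euclid / modular
-- inverse (O(log group)); equivalence is proved on all inputs where the Python A returns.

-- ===== PORT A =====
-- 'while inGroup < 0: inGroup += group' — fuel makes it total; with group ≥ 1 the fuel
-- inGroup.natAbs is enough to reproduce Python exactly (outside Pre_ Python diverges).
def pvNormLoop (group : Int) : Nat → Int → Int
  | 0, x => x
  | f + 1, x => if x < 0 then pvNormLoop group f (x + group) else x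

-- 'while m != inGroup: m = (m + val) % group; c += 1' — fuel group.natAbs suffices under Pre_.
def pvCycleLoop (val : Int) (group : Int) (target : Int) : Nat → Int → Int → Int
  | 0, _, c => c
  | f + 1, m, c =>
    if m ≠ target then pvCycleLoop val group target f (PySem.Int.mod (m + val) group) (c + 1)
    else c

def GetCyclesNeeded (val : Int) (group : Int) (inGroup : Int) : Int :=
  let inGroup1 := pvNormLoop group inGroup.natAbs inGroup
  let inGroup2 := PySem.Int.mod inGroup1 group
  pvCycleLoop val group inGroup2 group.natAbs 0 0

-- ===== PORT B =====
-- Source B's _egcd while-loop; fuel (|b| + 1) is enough: the rotating remainder strictly shrinks.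
def pvEgcdLoop : Nat → Int → Int → Int → Int → Int × Int
  | 0, old_r, _, old_s, _ => (old_r, old_s)
  | f + 1, old_r, r, old_s, s =>
    if r ≠ 0 then
      pvEgcdLoop f r (old_r - PySem.Int.floordiv old_r r * r) s (old_s - PySem.Int.floordiv old_r r * s)
    else (old_r, old_s)

def pvEgcd (a : Int) (b : Int) : Int × Int := pvEgcdLoop (b.natAbs + 1) a b 1 0

def GetCyclesNeeded_alt (val : Int) (group : Int) (inGroup : Int) : Int :=
  let target := PySem.Int.mod inGroup group
  let gx := pvEgcd (PySem.Int.mod val group) group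
  if PySem.Int.mod target gx.1 ≠ 0 then 0  -- Python raises ValueError here; outside Pre_
  else
    let n := PySem.Int.floordiv group gx.1
    PySem.Int.mod (PySem.Int.floordiv target gx.1 * gx.2) n

-- ===== PRECONDITION & SPEC =====
-- Exactly the inputs on which Python A returns: group = 0 raises ZeroDivisionError,
-- group < 0 with inGroup < 0 makes the first while loop diverge, and the cycle search
-- diverges unless gcd(val, group) divides inGroup.
def Pre_GetCyclesNeeded (val : Int) (group : Int) (inGroup : Int) : Prop :=
  (0 < group ∨ (group < 0 ∧ 0 ≤ inGroup)) ∧ (Int.gcd val group : Int) ∣ inGroup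

instance (val : Int) (group : Int) (inGroup : Int) : Decidable (Pre_GetCyclesNeeded val group inGroup) := by unfold Pre_GetCyclesNeeded; infer_instance

def pvWitness_GetCyclesNeeded : Int × Int × Int := (3, 7, 2)

def Spec_GetCyclesNeeded (val : Int) (group : Int) (inGroup : Int) (out : Int) : Prop := out = GetCyclesNeeded_alt val group inGroup
instance (val : Int) (group : Int) (inGroup : Int) (out : Int) : Decidable (Spec_GetCyclesNeeded val group inGroup out) := by unfold Spec_GetCyclesNeeded; infer_instance

-- ===== CLAIM (what is proved, stated in full; the proofs are below) =====
def Claim_equal_GetCyclesNeeded : Prop := ∀ (val : Int) (group : Int) (inGroup : Int), Dom_GetCyclesNeeded val group inGroup → Pre_GetCyclesNeeded val group inGroup → Spec_GetCyclesNeeded val group inGroup (GetCyclesNeeded val group inGroup)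

-- ===== LEMMAS AND PROOFS =====

-- Python mod characterised: two ints have the same mod b iff b divides their difference.
theorem pvMod_sub (u b : Int) : u - PySem.Int.floordiv u b * b = PySem.Int.mod u b := by
  have := PySem.Int.floordiv_mul_add_mod u b
  omega

theorem pvMod_eq_iff_dvd (u w b : Int) (hb : b ≠ 0) :
    PySem.Int.mod u b = PySem.Int.mod w b ↔ b ∣ (u - w) := by
  constructor
  · intro h
    have hu := pvMod_sub u b
    have hw := pvMod_sub w b
    have : u - w = (PySem.Int.floordiv u b - PySem.Int.floordiv w b) * b := by
      rw [sub_mul]; omega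
    exact ⟨_, by rw [this, mul_comm]⟩
  · intro ⟨k, hk⟩
    have hu := pvMod_sub u b
    have hw := pvMod_sub w b
    have hdvd : |b| ∣ (PySem.Int.mod u b - PySem.Int.mod w b) := by
      rw [abs_dvd]
      exact ⟨k - PySem.Int.floordiv u b + PySem.Int.floordiv w b, by linear_combination -hu + hw + hk⟩
    have h0 : PySem.Int.mod u b - PySem.Int.mod w b = 0 := by
      apply Int.eq_zero_of_abs_lt_dvd hdvd
      rcases lt_or_gt_of_ne hb with h | h
      · have b1 := PySem.Int.mod_neg_bounds u h
        have b2 := PySem.Int.mod_neg_bounds w h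
        rw [abs_sub_lt_iff]; constructor <;> [skip; skip] <;> (rw [abs_of_neg h]; omega)
      · have b1 := PySem.Int.mod_nonneg u h
        have b2 := PySem.Int.mod_lt u h
        have b3 := PySem.Int.mod_nonneg w h
        have b4 := PySem.Int.mod_lt w h
        rw [abs_sub_lt_iff]; constructor <;> (rw [abs_of_pos h]; omega)
    omega

theorem pvMod_add_self (x group : Int) (hg : group ≠ 0) :
    PySem.Int.mod (x + group) group = PySem.Int.mod x group := by
  rw [pvMod_eq_iff_dvd _ _ _ hg]; exact ⟨1, by ring⟩

theorem pvMod_zero_left (b : Int) (hb : b ≠ 0) : PySem.Int.mod 0 b = 0 := by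
  have h := pvMod_sub 0 b
  have hd : |b| ∣ (PySem.Int.mod 0 b) := by
    rw [abs_dvd]
    exact ⟨-(PySem.Int.floordiv 0 b), by linear_combination -h⟩
  apply Int.eq_zero_of_abs_lt_dvd hd
  rcases lt_or_gt_of_ne hb with hlt | hlt
  · have b1 := PySem.Int.mod_neg_bounds 0 hlt
    rw [abs_of_neg hlt, abs_lt]; omega
  · have b1 := PySem.Int.mod_nonneg 0 hlt
    have b2 := PySem.Int.mod_lt 0 hlt
    rw [abs_of_pos hlt, abs_lt]; omega

-- the normalisation loop does not change the residue
theorem pvNormLoop_mod (group : Int) (hg : group ≠ 0) :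
    ∀ (f : Nat) (x : Int), PySem.Int.mod (pvNormLoop group f x) group = PySem.Int.mod x group := by
  intro f
  induction f with
  | zero => intro x; rfl
  | succ f ih =>
    intro x
    simp only [pvNormLoop]
    split
    · rw [ih, pvMod_add_self _ _ hg]
    · rfl

-- extended-Euclid loop invariant: final (g, x) has |g| = gcd, b ∣ x*a - g, and g keeps b's sign
theorem pvEgcdLoop_spec (a b : Int) (hb : b ≠ 0) :
    ∀ (fuel : Nat) (or r os s : Int), r.natAbs < fuel →
    (0 < b → 0 ≤ or ∧ 0 ≤ r) → (b < 0 → or ≤ 0 ∧ r ≤ 0) →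
    b ∣ (os * a - or) → b ∣ (s * a - r) →
    (pvEgcdLoop fuel or r os s).1.natAbs = Int.gcd or r ∧
    b ∣ ((pvEgcdLoop fuel or r os s).2 * a - (pvEgcdLoop fuel or r os s).1) ∧
    (0 < b → 0 ≤ (pvEgcdLoop fuel or r os s).1) ∧
    (b < 0 → (pvEgcdLoop fuel or r os s).1 ≤ 0) := by
  intro fuel
  induction fuel with
  | zero => intro or r os s hf; omega
  | succ f ih =>
    intro or r os s hf hpos hneg hos hs
    by_cases hr : r = 0
    · subst hr
      have hred : pvEgcdLoop (f + 1) or 0 os s = (or, os) := by simp [pvEgcdLoop]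
      rw [hred]
      refine ⟨by simp, hos, fun h => (hpos h).1, fun h => (hneg h).1⟩
    · simp only [pvEgcdLoop, if_pos hr]
      set q := PySem.Int.floordiv or r with hq
      have hmod : or - q * r = PySem.Int.mod or r := pvMod_sub or r
      have hlt : (or - q * r).natAbs < r.natAbs := by
        rw [hmod]
        rcases lt_or_gt_of_ne hr with h | h
        · have := PySem.Int.mod_neg_bounds or h; omega
        · have := PySem.Int.mod_nonneg or h
          have := PySem.Int.mod_lt or h; omega
      have hgcd : Int.gcd r (or - q * r) = Int.gcd or r := by
        rw [sub_eq_add_neg, ← neg_mul, mul_comm, Int.gcd_comm or r, mul_comm]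
        exact Int.gcd_add_mul_right_right r or (-q)
      have hres := ih r (or - q * r) s (os - q * s) (by omega)
        (fun h => by
          have := hpos h
          rw [hmod]
          have : 0 ≤ PySem.Int.mod or r := PySem.Int.mod_nonneg or (by omega)
          omega)
        (fun h => by
          have := hneg h
          rw [hmod]
          have := PySem.Int.mod_neg_bounds or (show r < 0 by omega)
          omega)
        hs
        (by
          obtain ⟨k1, hk1⟩ := hos
          obtain ⟨k2, hk2⟩ := hs
          exact ⟨k1 - q * k2, by linear_combination hk1 - q * hk2⟩)
      rw [hgcd] at hres
      exact hres

-- the A-loop returns cB as soon as cB is the least nonnegative solution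
theorem pvCycleLoop_eq (val group target cB : Int) (hg : group ≠ 0)
    (hcB : 0 ≤ cB)
    (hsol : PySem.Int.mod (cB * val) group = target)
    (hmin : ∀ c : Int, 0 ≤ c → c < cB → PySem.Int.mod (c * val) group ≠ target) :
    ∀ (fuel : Nat) (c : Int), 0 ≤ c → c ≤ cB → (cB - c).toNat < fuel →
    pvCycleLoop val group target fuel (PySem.Int.mod (c * val) group) c = cB := by
  intro fuel
  induction fuel with
  | zero => intro c _ _ h; omega
  | succ f ih =>
    intro c hc hle hf
    simp only [pvCycleLoop]
    by_cases hm : PySem.Int.mod (c * val) group = target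
    · rw [if_neg (by simpa using hm)]
      by_cases h : c = cB
      · exact h
      · exact absurd hm (hmin c hc (by omega))
    · rw [if_pos (by simpa using hm)]
      have hclt : c < cB := by
        rcases eq_or_lt_of_le hle with h | h
        · exact absurd (h ▸ hsol) hm
        · exact h
      have hstep : PySem.Int.mod (PySem.Int.mod (c * val) group + val) group
          = PySem.Int.mod ((c + 1) * val) group := by
        rw [pvMod_eq_iff_dvd _ _ _ hg]
        have h1 : group ∣ (PySem.Int.mod (c * val) group - c * val) := by
          rw [← pvMod_sub]; exact ⟨-(PySem.Int.floordiv (c * val) group), by ring⟩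
        obtain ⟨k, hk⟩ := h1
        exact ⟨k, by rw [← hk]; ring⟩
      rw [hstep]
      exact ih (c + 1) (by omega) (by omega) (by omega)

-- exact division: floordiv (g * n) g = n
theorem pvFloordiv_mul (g n0 : Int) (hg : g ≠ 0) : PySem.Int.floordiv (g * n0) g = n0 := by
  have h := pvMod_sub (g * n0) g
  have hz : PySem.Int.mod (g * n0) g = 0 := (PySem.Int.mod_eq_zero_iff_dvd _ _).mpr ⟨n0, rfl⟩
  rw [hz] at h
  exact mul_right_cancel₀ hg (by linear_combination -h)

-- ===== main proof =====
theorem GetCyclesNeeded_agree (val group inGroup : Int)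
    (hpre : Pre_GetCyclesNeeded val group inGroup) :
    GetCyclesNeeded val group inGroup = GetCyclesNeeded_alt val group inGroup := by
  obtain ⟨hside, hdvd⟩ := hpre
  have hg : group ≠ 0 := by rcases hside with h | ⟨h, _⟩ <;> omega
  have hq_val := pvMod_sub val group
  have hGa0 : Int.gcd (PySem.Int.mod val group) group = Int.gcd val group := by
    rw [Int.gcd_comm _ group, Int.gcd_comm val group, ← hq_val]
    have e : val - PySem.Int.floordiv val group * group
        = val + -PySem.Int.floordiv val group * group := by ring
    rw [e]
    exact Int.gcd_add_mul_right_right group val (-(PySem.Int.floordiv val group))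
  set a := PySem.Int.mod val group with ha
  set r := PySem.Int.mod inGroup group with hr
  have hspec := pvEgcdLoop_spec a group hg (group.natAbs + 1) a group 1 0 (by omega)
    (fun h => ⟨PySem.Int.mod_nonneg val h, by omega⟩)
    (fun h => ⟨(PySem.Int.mod_neg_bounds val h).2, by omega⟩)
    ⟨0, by ring⟩ ⟨-1, by ring⟩
  obtain ⟨hgabs, hcong0, hgpos, hgneg⟩ := hspec
  set g := (pvEgcdLoop (group.natAbs + 1) a group 1 0).1 with hgdef
  set x := (pvEgcdLoop (group.natAbs + 1) a group 1 0).2 with hxdef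
  rw [hGa0] at hgabs
  have hGpos : 0 < Int.gcd val group := Int.gcd_pos_iff.mpr (Or.inr hg)
  have hgne : g ≠ 0 := by
    intro h
    rw [h] at hgabs
    simp at hgabs
    omega
  have hdg : ∀ y : Int, (Int.gcd val group : Int) ∣ y → g ∣ y := fun y hy => by
    rw [← Int.natAbs_dvd, hgabs]; exact hy
  obtain ⟨n, hn⟩ : g ∣ group := hdg group (Int.gcd_dvd_right val group)
  obtain ⟨vq, hvq⟩ : g ∣ val := hdg val (Int.gcd_dvd_left val group)
  have h7 := pvMod_sub inGroup group
  have hg_r : g ∣ r := by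
    obtain ⟨w, hw⟩ := hdg inGroup hdvd
    exact ⟨w - PySem.Int.floordiv inGroup group * n,
      by linear_combination -h7 + hw - PySem.Int.floordiv inGroup group * hn⟩
  obtain ⟨rq, hrq⟩ := hg_r
  have hg_a : g ∣ a := ⟨vq - PySem.Int.floordiv val group * n,
    by linear_combination -hq_val + hvq - PySem.Int.floordiv val group * hn⟩
  obtain ⟨aq, haq⟩ := hg_a
  have hnpos : 0 < n := by
    by_contra hno
    push_neg at hno
    rcases lt_or_gt_of_ne hg with hlt | hlt
    · have hgl : g < 0 := lt_of_le_of_ne (hgneg hlt) hgne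
      nlinarith [mul_nonneg (neg_nonneg.mpr hgl.le) (neg_nonneg.mpr hno)]
    · have hgl : 0 < g := lt_of_le_of_ne (hgpos hlt) (Ne.symm hgne)
      nlinarith [mul_nonpos_of_nonneg_of_nonpos hgl.le hno]
  have hfd_group : PySem.Int.floordiv group g = n := by
    rw [hn]; exact pvFloordiv_mul g n hgne
  have hfd_r : PySem.Int.floordiv r g = rq := by
    rw [hrq]; exact pvFloordiv_mul g rq hgne
  set cB := PySem.Int.mod (rq * x) n with hcB
  have hcB0 : 0 ≤ cB := PySem.Int.mod_nonneg _ hnpos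
  have hcBlt : cB < n := PySem.Int.mod_lt _ hnpos
  have hk := pvMod_sub (rq * x) n
  obtain ⟨k3, hk3⟩ := hcong0
  -- cB solves  cB * val ≡ inGroup  (mod group)
  have hdvd_sol : group ∣ (cB * val - inGroup) := by
    have d1 : group ∣ (cB * val - cB * a) :=
      ⟨cB * PySem.Int.floordiv val group, by linear_combination cB * hq_val⟩
    have d2 : group ∣ (cB * a - r) :=
      ⟨rq * k3 - PySem.Int.floordiv (rq * x) n * aq,
        by linear_combination (-a) * hk + rq * hk3 - hrq
          + (PySem.Int.floordiv (rq * x) n * aq) * hn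
          - (PySem.Int.floordiv (rq * x) n * n) * haq⟩
    have d3 : group ∣ (r - inGroup) :=
      ⟨-(PySem.Int.floordiv inGroup group), by linear_combination -h7⟩
    have hsum : cB * val - inGroup = (cB * val - cB * a) + (cB * a - r) + (r - inGroup) := by ring
    rw [hsum]
    exact dvd_add (dvd_add d1 d2) d3
  have hsol : PySem.Int.mod (cB * val) group = r := by
    rw [hr, pvMod_eq_iff_dvd _ _ _ hg]
    exact hdvd_sol
  -- coprimality of n and vq
  have hcop : Int.gcd n vq = 1 := by
    have habs_val : val.natAbs = g.natAbs * vq.natAbs := by rw [hvq, Int.natAbs_mul]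
    have habs_group : group.natAbs = g.natAbs * n.natAbs := by rw [hn, Int.natAbs_mul]
    have hGdef : Int.gcd val group = Nat.gcd val.natAbs group.natAbs := rfl
    have hgpos' : 0 < g.natAbs := Int.natAbs_pos.mpr hgne
    have hc := Nat.coprime_div_gcd_div_gcd (m := val.natAbs) (n := group.natAbs) (by omega)
    rw [← hGdef, ← hgabs] at hc
    rw [habs_val, habs_group, Nat.mul_div_cancel_left _ hgpos', Nat.mul_div_cancel_left _ hgpos'] at hc
    show Nat.gcd n.natAbs vq.natAbs = 1
    exact Nat.Coprime.gcd_eq_one hc.symm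
  -- cB is the least nonnegative solution
  have hmin : ∀ c : Int, 0 ≤ c → c < cB → PySem.Int.mod (c * val) group ≠ r := by
    intro c hc0 hclt hceq
    have hd : group ∣ (cB * val - c * val) := by
      rw [← pvMod_eq_iff_dvd _ _ _ hg, hsol, hceq]
    obtain ⟨t, ht⟩ := hd
    have hnd : n ∣ ((cB - c) * vq) := by
      refine ⟨t, mul_left_cancel₀ hgne ?_⟩
      linear_combination ht - (cB - c) * hvq + t * hn
    have hnd2 : n ∣ (cB - c) := Int.dvd_of_dvd_mul_left_of_gcd_one hnd hcop
    have := Int.le_of_dvd (by omega) hnd2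
    omega
  -- fuel bound: n ≤ |group|
  have hfuel : n ≤ (group.natAbs : Int) := by
    have h2 : (n.natAbs : Int) = n := Int.natAbs_of_nonneg hnpos.le
    have h1 : ((group.natAbs : Int)) = (g.natAbs : Int) * n := by
      rw [hn, Int.natAbs_mul]
      push_cast
      rw [abs_of_pos hnpos]
    have hgabs1 : 1 ≤ (g.natAbs : Int) := by
      have := Int.natAbs_pos.mpr hgne
      omega
    nlinarith
  -- A computes cB
  have hA : GetCyclesNeeded val group inGroup = cB := by
    show pvCycleLoop val group
      (PySem.Int.mod (pvNormLoop group inGroup.natAbs inGroup) group) group.natAbs 0 0 = cB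
    rw [pvNormLoop_mod group hg]
    have h0 := pvCycleLoop_eq val group r cB hg hcB0 hsol hmin group.natAbs 0
      (le_refl 0) hcB0 (by omega)
    rw [zero_mul, pvMod_zero_left group hg] at h0
    rw [← hr]
    exact h0
  -- B computes cB
  have hB : GetCyclesNeeded_alt val group inGroup = cB := by
    show (if PySem.Int.mod r g ≠ 0 then 0
      else PySem.Int.mod (PySem.Int.floordiv r g * x) (PySem.Int.floordiv group g)) = cB
    have hz : PySem.Int.mod r g = 0 := (PySem.Int.mod_eq_zero_iff_dvd _ _).mpr ⟨rq, hrq⟩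
    rw [if_neg (by simp [hz])]
    rw [hfd_r, hfd_group]
  rw [hA, hB]

-- ===== VERDICT (by name: the statement is the Claim_ definition above) =====
theorem GetCyclesNeeded_spec : Claim_equal_GetCyclesNeeded := by
  intro val group inGroup _ hpre
  exact GetCyclesNeeded_agree val group inGroup hpre
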